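-- pv_equiv track=rewrite | github.com/JSK-KML/CP125-Class-Repo | labs/lab06/exercise1/exercise1.py | get_legit_power_users
-- ===== SOURCE A (Python) =====
-- def get_legit_power_users(log_data, bot_ids, threshold):
--     user_action = {}
--     for timestamp, user_id, action_type in log_data:
--         if user_id in bot_ids:
--             continue
--         if user_id not in user_action:
--             user_action[user_id] = set()
--         user_action[user_id].add(action_type)
--     powerusers = []
--     for user_id, unique_actions in user_action.items():
--         if len(unique_actions) > threshold:
--             powerusers.append(user_id)
--
--     return sorted(powerusers)
-- ===== SOURCE B (Python) =====
-- def get_legit_power_users(log_data, bot_ids, threshold):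
--     bots = set(bot_ids)
--     users = []
--     for _, user_id, _ in log_data:
--         if user_id not in bots and user_id not in users:
--             users.append(user_id)
--     return sorted(
--         u for u in users
--         if len({a for _, v, a in log_data if v == u}) > threshold
--     )
-- ===== Notes on version B (the rewrite author's own statement) =====
-- stated objective: alternative
-- what changed: Replaces the dict-of-sets grouping pass by: one pass collecting distinct non-bot users (bot lookup through a set built once), then a per-user rescan of the log with a set comprehension counting that user's distinct actions.
import Mathlib
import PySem

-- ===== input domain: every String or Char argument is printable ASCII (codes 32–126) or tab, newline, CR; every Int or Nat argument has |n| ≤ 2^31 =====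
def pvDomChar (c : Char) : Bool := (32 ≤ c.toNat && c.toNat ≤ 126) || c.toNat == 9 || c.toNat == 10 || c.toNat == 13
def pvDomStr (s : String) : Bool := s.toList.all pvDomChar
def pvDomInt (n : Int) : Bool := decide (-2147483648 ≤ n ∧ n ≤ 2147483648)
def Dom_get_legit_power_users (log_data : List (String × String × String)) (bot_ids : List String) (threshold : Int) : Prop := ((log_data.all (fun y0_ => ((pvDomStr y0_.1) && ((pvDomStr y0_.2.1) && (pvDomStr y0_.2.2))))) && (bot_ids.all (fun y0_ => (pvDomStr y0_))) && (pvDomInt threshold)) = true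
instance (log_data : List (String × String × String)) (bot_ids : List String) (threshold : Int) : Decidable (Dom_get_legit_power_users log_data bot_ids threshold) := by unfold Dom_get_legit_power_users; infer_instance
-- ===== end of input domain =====

-- B replaces A's dict-of-sets grouping by one pass collecting distinct non-bot users
-- (bot membership via a set built once) plus a per-user rescan counting distinct actions (objective: alternative).

-- ===== PORT A =====
def get_legit_power_users (log_data : List (String × String × String)) (bot_ids : List String) (threshold : Int) : List String :=
  let user_action : PySem.Dict String (PySem.Set String) :=
    log_data.foldl (fun d e =>
      if e.2.1 ∈ bot_ids then d
      else
        let d1 := if d.contains e.2.1 then d else d.insert e.2.1 PySem.Set.empty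
        d1.insert e.2.1 (PySem.Set.add (d1.getD e.2.1 PySem.Set.empty) e.2.2)) PySem.Dict.empty
  let powerusers : List String :=
    user_action.items.foldl (fun acc p => if ((p.2.length : Int) > threshold) then acc ++ [p.1] else acc) []
  PySem.List.sorted powerusers (fun x => x) false

-- ===== PORT B =====
def get_legit_power_users_alt (log_data : List (String × String × String)) (bot_ids : List String) (threshold : Int) : List String :=
  let bots : PySem.Set String := PySem.Set.ofList bot_ids
  let users : List String :=
    log_data.foldl (fun us e => if bots.contains e.2.1 = false ∧ e.2.1 ∉ us then us ++ [e.2.1] else us) []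
  PySem.List.sorted
    (users.filter (fun u =>
      decide (((PySem.Set.ofList ((log_data.filter (fun e => e.2.1 == u)).map (fun e => e.2.2))).length : Int) > threshold)))
    (fun x => x) false

-- ===== PRECONDITION & SPEC =====
def Spec_get_legit_power_users (log_data : List (String × String × String)) (bot_ids : List String) (threshold : Int) (out : List String) : Prop := out = get_legit_power_users_alt log_data bot_ids threshold
instance (log_data : List (String × String × String)) (bot_ids : List String) (threshold : Int) (out : List String) : Decidable (Spec_get_legit_power_users log_data bot_ids threshold out) := by unfold Spec_get_legit_power_users; infer_instance

-- ===== CLAIM (what is proved, stated in full; the proofs are below) =====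
def Claim_equal_get_legit_power_users : Prop := ∀ (log_data : List (String × String × String)) (bot_ids : List String) (threshold : Int), Dom_get_legit_power_users log_data bot_ids threshold → Spec_get_legit_power_users log_data bot_ids threshold (get_legit_power_users log_data bot_ids threshold)

-- ===== LEMMAS AND PROOFS =====

-- the distinct non-bot users of l, appended (in first-appearance order) to us; B's first loop with init us
def pvAdd (bot_ids : List String) (l : List (String × String × String)) (us : List String) : List String :=
  l.foldl (fun us e => if (PySem.Set.ofList bot_ids).contains e.2.1 = false ∧ e.2.1 ∉ us then us ++ [e.2.1] else us) us

-- the action types of user u in l, in order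
def pvActs (u : String) (l : List (String × String × String)) : List String :=
  (l.filter (fun e => e.2.1 == u)).map (fun e => e.2.2)

-- the (decidable) condition of B's first loop, read as plain membership
lemma pvCond (bot_ids : List String) (x : String) (us : List String) :
    ((PySem.Set.ofList bot_ids).contains x = false ∧ x ∉ us) ↔ (x ∉ bot_ids ∧ x ∉ us) := by
  simp [PySem.Set.contains_eq_listContains, List.contains_eq_mem, PySem.Set.mem_ofList]

lemma pvAdd_cons (bot_ids : List String) (e : String × String × String)
    (l : List (String × String × String)) (us : List String) :
    pvAdd bot_ids (e :: l) us
      = pvAdd bot_ids l (if e.2.1 ∉ bot_ids ∧ e.2.1 ∉ us then us ++ [e.2.1] else us) := by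
  simp only [pvAdd, List.foldl_cons]
  congr 1
  rw [if_congr (pvCond bot_ids e.2.1 us) rfl rfl]

lemma pvAdd_mem (bot_ids : List String) (l : List (String × String × String)) (us : List String)
    (h : ∀ x ∈ us, x ∉ bot_ids) : ∀ u ∈ pvAdd bot_ids l us, u ∉ bot_ids := by
  induction l generalizing us with
  | nil => simpa [pvAdd] using h
  | cons e l ih =>
    rw [pvAdd_cons]
    split_ifs with hc
    · refine ih _ ?_
      intro x hx
      rcases List.mem_append.1 hx with hx | hx
      · exact h x hx
      · simp only [List.mem_singleton] at hx
        subst hx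
        exact hc.1
    · exact ih _ h

-- main invariant: A's dict loop produces, as items, the distinct non-bot users paired with
-- the fold of Set.add over their actions
lemma pv_main (bot_ids : List String) (l : List (String × String × String)) (us : List String)
    (g : String → PySem.Set String) (d : PySem.Dict String (PySem.Set String))
    (hnd : us.Nodup) (hnb : ∀ u ∈ us, u ∉ bot_ids)
    (hitems : d.items = us.map (fun u => (u, g u))) :
    (l.foldl (fun d e =>
        if e.2.1 ∈ bot_ids then d
        else
          let d1 := if d.contains e.2.1 then d else d.insert e.2.1 PySem.Set.empty
          d1.insert e.2.1 (PySem.Set.add (d1.getD e.2.1 PySem.Set.empty) e.2.2)) d).items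
      = (pvAdd bot_ids l us).map
          (fun u => (u, (pvActs u l).foldl PySem.Set.add (if u ∈ us then g u else PySem.Set.empty))) := by
  induction l generalizing us g d with
  | nil =>
    simp only [List.foldl_nil, pvAdd, pvActs, List.filter_nil, List.map_nil, hitems]
    exact List.map_congr_left (fun u hu => by simp [hu])
  | cons e l ih =>
    have hkeys : d.keys = us := by
      simp [PySem.Dict.keys, hitems, Function.comp_def]
    have hknd : d.keys.Nodup := by rw [hkeys]; exact hnd
    simp only [List.foldl_cons]
    rw [pvAdd_cons]
    by_cases hb : e.2.1 ∈ bot_ids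
    · rw [if_pos hb, if_neg (fun hcond => hcond.1 hb)]
      rw [ih us g d hnd hnb hitems]
      refine List.map_congr_left ?_
      intro u hu
      have hub : u ∉ bot_ids := pvAdd_mem bot_ids l us hnb u hu
      have hne : (e.2.1 == u) = false := by
        simp only [beq_eq_false_iff_ne]
        intro h
        exact hub (h ▸ hb)
      simp [pvActs, hne]
    · rw [if_neg hb]
      by_cases hv : e.2.1 ∈ us
      · -- existing user: the dict entry is updated in place
        have hcont : d.contains e.2.1 = true := by
          rw [PySem.Dict.contains_eq_decide_mem_keys, hkeys]
          simp [hv]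
        simp only [hcont, reduceIte]
        have hget : d.getD e.2.1 PySem.Set.empty = g e.2.1 := by
          exact PySem.Dict.getD_of_mem_items d (by rw [hitems]; exact List.mem_map_of_mem hv) hknd _
        rw [hget]
        have hitems' : (d.insert e.2.1 (PySem.Set.add (g e.2.1) e.2.2)).items
            = us.map (fun u => (u, if u = e.2.1 then PySem.Set.add (g e.2.1) e.2.2 else g u)) := by
          rw [PySem.Dict.items_insert_of_contains d _ hcont, hitems, List.map_map]
          refine List.map_congr_left ?_
          intro u hu
          by_cases h : u = e.2.1 <;> simp [h]
        rw [ih us _ _ hnd hnb hitems']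
        rw [if_neg (fun hcond => hcond.2 hv)]
        refine List.map_congr_left ?_
        intro u hu
        by_cases h : u = e.2.1
        · subst h
          simp [pvActs, hv]
        · have hne : (e.2.1 == u) = false := by
            simp only [beq_eq_false_iff_ne]
            exact fun he => h he.symm
          simp [pvActs, hne, h]
      · -- fresh user: a new entry is appended
        have hcont : d.contains e.2.1 = false := by
          rw [PySem.Dict.contains_eq_decide_mem_keys, hkeys]
          simp [hv]
        simp only [hcont, Bool.false_eq_true, if_false]
        rw [PySem.Dict.getD_insert_self]
        have hitems' : ((d.insert e.2.1 PySem.Set.empty).insert e.2.1 (PySem.Set.add PySem.Set.empty e.2.2)).items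
            = (us ++ [e.2.1]).map (fun u => (u, if u = e.2.1 then PySem.Set.add PySem.Set.empty e.2.2 else g u)) := by
          rw [PySem.Dict.items_insert_of_contains _ _ (PySem.Dict.contains_insert_self _ _ _),
              PySem.Dict.items_insert_of_not_contains _ _ hcont, hitems]
          rw [List.map_append, List.map_append, List.map_map]
          congr 1
          · refine List.map_congr_left ?_
            intro u hu
            have h : u ≠ e.2.1 := fun he => hv (he ▸ hu)
            simp [h]
          · simp
        have hnd' : (us ++ [e.2.1]).Nodup := by
          simp only [List.nodup_append, List.nodup_singleton, true_and]
          refine ⟨hnd, ?_⟩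
          intro a ha b hb'
          simp only [List.mem_singleton] at hb'
          subst hb'
          exact fun he => hv (he ▸ ha)
        have hnb' : ∀ u ∈ us ++ [e.2.1], u ∉ bot_ids := by
          intro u hu
          rcases List.mem_append.1 hu with hu | hu
          · exact hnb u hu
          · simp only [List.mem_singleton] at hu
            subst hu
            exact hb
        rw [ih (us ++ [e.2.1]) _ _ hnd' hnb' hitems']
        rw [if_pos ⟨hb, hv⟩]
        refine List.map_congr_left ?_
        intro u hu
        by_cases h : u = e.2.1
        · subst h
          simp [pvActs, hv]
        · have hne : (e.2.1 == u) = false := by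
            simp only [beq_eq_false_iff_ne]
            exact fun he => h he.symm
          simp [pvActs, hne, h]

theorem get_legit_power_users_spec : Claim_equal_get_legit_power_users := by
  intro log_data bot_ids threshold _
  unfold Spec_get_legit_power_users get_legit_power_users get_legit_power_users_alt
  simp only []
  rw [pv_main bot_ids log_data [] (fun _ => PySem.Set.empty) PySem.Dict.empty List.nodup_nil
        (by simp) (by simp [PySem.Dict.empty])]
  rw [PySem.List.foldl_append_ite (p := fun p : String × PySem.Set String => (p.2.length : Int) > threshold) (f := fun p => p.1)]
  rw [List.nil_append, List.filter_map, List.map_map]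
  show PySem.List.sorted _ _ _ = PySem.List.sorted _ _ _
  congr 1
  have hmap : List.map ((fun p : String × PySem.Set String => p.1) ∘ fun u =>
      (u, List.foldl PySem.Set.add (if u ∈ ([] : List String) then PySem.Set.empty else PySem.Set.empty) (pvActs u log_data)))
      = List.map (fun u : String => u) := rfl
  rw [hmap, List.map_id']
  refine List.filter_congr ?_
  intro u _
  simp [PySem.Set.ofList_eq_foldl, pvActs, PySem.Set.empty]
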